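-- pv_equiv track=rewrite | github.com/RubanOff/VK | Seminar №5/MaxMultiplication.py | max_min_multiplication
-- ===== SOURCE A (Python) =====
-- def max_min_multiplication(data):
--     if len(data) < 3:
--         return -1
--
--     min_index = 1
--     max_index = 2
--
--     # Left node
--     i = 1
--     while i < len(data):
--         min_index = i
--         i = 2 * i + 1
--
--     # Right node
--     i = 1
--     while i < len(data):
--         max_index = i
--         i = 2 * i + 2
--
--     result = data[min_index] * data[max_index]
--     return result
-- ===== SOURCE B (Python) =====
-- def max_min_multiplication(data):
--     if len(data) < 3:
--         return -1
--     n = len(data)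
--     mi = (1 << (n.bit_length() - 1)) - 1
--     m = ((n + 1) // 3).bit_length() - 1
--     ma = 3 * (1 << m) - 2
--     return data[mi] * data[ma]
-- ===== Notes on version B (the rewrite author's own statement) =====
-- stated objective: alternative
-- what changed: The two index-doubling while loops (leftmost path 2i+1, rightmost path 2i+2) are replaced by closed-form bit-length formulas: min_index = 2^(n.bit_length()-1)-1 and max_index = 3*2^m-2 with m = ((n+1)//3).bit_length()-1.
import Mathlib
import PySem

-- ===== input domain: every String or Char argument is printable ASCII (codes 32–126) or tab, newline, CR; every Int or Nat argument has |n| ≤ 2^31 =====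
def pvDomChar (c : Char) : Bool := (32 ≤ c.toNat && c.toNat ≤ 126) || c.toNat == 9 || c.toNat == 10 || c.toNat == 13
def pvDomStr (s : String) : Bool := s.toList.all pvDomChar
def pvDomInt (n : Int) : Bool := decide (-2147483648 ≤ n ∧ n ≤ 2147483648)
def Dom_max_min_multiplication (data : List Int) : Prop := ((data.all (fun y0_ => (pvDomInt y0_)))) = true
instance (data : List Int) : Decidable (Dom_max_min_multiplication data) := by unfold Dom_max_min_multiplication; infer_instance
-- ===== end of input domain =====

-- B replaces A's two index-doubling while loops by closed-form bit-length formulas (alternative decomposition, O(1) index computation).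

-- ===== PORT A =====
-- A's left while loop: i = 2*i+1, remembering the last i < n (indices always in range, proof below)
def mmLoopL (n i acc : Nat) : Nat :=
  if i < n then mmLoopL n (2 * i + 1) i else acc
termination_by n - i
decreasing_by omega

-- A's right while loop: i = 2*i+2
def mmLoopR (n i acc : Nat) : Nat :=
  if i < n then mmLoopR n (2 * i + 2) i else acc
termination_by n - i
decreasing_by omega

def max_min_multiplication (data : List Int) : Int :=
  if data.length < 3 then -1
  else
    let min_index := mmLoopL data.length 1 1
    let max_index := mmLoopR data.length 1 2
    -- data[min_index] * data[max_index]; both indices are provably < data.length, so getD 0 is never taken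
    ((PySem.List.pyGet? data (min_index : Int)).getD 0) *
      ((PySem.List.pyGet? data (max_index : Int)).getD 0)

-- ===== PORT B =====
-- Python's int.bit_length() (for nonnegative n), transcribed step for step
def mmBitLen (n : Nat) : Nat :=
  if n = 0 then 0 else mmBitLen (n / 2) + 1

def max_min_multiplication_alt (data : List Int) : Int :=
  if data.length < 3 then -1
  else
    let n := data.length
    let mi := 2 ^ (mmBitLen n - 1) - 1
    let m := mmBitLen ((n + 1) / 3) - 1
    let ma := 3 * 2 ^ m - 2
    ((PySem.List.pyGet? data (mi : Int)).getD 0) *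
      ((PySem.List.pyGet? data (ma : Int)).getD 0)

-- ===== PRECONDITION & SPEC =====
def Spec_max_min_multiplication (data : List Int) (out : Int) : Prop := out = max_min_multiplication_alt data
instance (data : List Int) (out : Int) : Decidable (Spec_max_min_multiplication data out) := by unfold Spec_max_min_multiplication; infer_instance

-- ===== CLAIM (what is proved, stated in full; the proofs are below) =====
def Claim_equal_max_min_multiplication : Prop := ∀ (data : List Int), Dom_max_min_multiplication data → Spec_max_min_multiplication data (max_min_multiplication data)

-- ===== LEMMAS AND PROOFS =====

theorem mmBitLen_eq_log2 (n : Nat) (h : 1 ≤ n) : mmBitLen n = Nat.log2 n + 1 := by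
  by_cases h2 : 2 ≤ n
  · have ih := mmBitLen_eq_log2 (n / 2) (by omega)
    have h1 : 2 ^ Nat.log2 (n / 2) ≤ n / 2 := Nat.log2_self_le (by omega)
    have h2' : n / 2 < 2 ^ (Nat.log2 (n / 2) + 1) := Nat.lt_log2_self
    have e1 : 2 ^ (Nat.log2 (n / 2) + 1) = 2 * 2 ^ Nat.log2 (n / 2) := by ring
    have e2 : 2 ^ (Nat.log2 (n / 2) + 2) = 4 * 2 ^ Nat.log2 (n / 2) := by ring
    have hlog : Nat.log2 n = Nat.log2 (n / 2) + 1 := by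
      have ha : Nat.log2 (n / 2) + 1 ≤ Nat.log2 n := (Nat.le_log2 (by omega)).mpr (by omega)
      have hb : Nat.log2 n < Nat.log2 (n / 2) + 2 := (Nat.log2_lt (by omega)).mpr (by omega)
      omega
    rw [mmBitLen, if_neg (by omega : ¬ n = 0), ih, hlog]
  · have hn1 : n = 1 := by omega
    subst hn1
    have hb : mmBitLen 1 = 1 := by rw [mmBitLen]; norm_num; rw [mmBitLen]; norm_num
    have hl : Nat.log2 1 = 0 := by
      have := (Nat.log2_lt (by omega : (1:Nat) ≠ 0)).mpr (by norm_num : (1:Nat) < 2 ^ 1)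
      omega
    rw [hb, hl]

theorem mmLoopL_closed (n k acc : Nat) (h : 2 ^ k - 1 < n) :
    mmLoopL n (2 ^ k - 1) acc = 2 ^ Nat.log2 n - 1 := by
  have hpk : 1 ≤ 2 ^ k := Nat.one_le_two_pow
  have hpk1 : 2 ^ (k + 1) = 2 * 2 ^ k := by ring
  unfold mmLoopL
  rw [if_pos h]
  have hstep : 2 * (2 ^ k - 1) + 1 = 2 ^ (k + 1) - 1 := by omega
  rw [hstep]
  by_cases h2 : 2 ^ (k + 1) - 1 < n
  · exact mmLoopL_closed n (k + 1) _ h2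
  · unfold mmLoopL
    rw [if_neg h2]
    have hn0 : n ≠ 0 := by omega
    have hle : k ≤ Nat.log2 n := (Nat.le_log2 hn0).mpr (by omega)
    have hlt : Nat.log2 n < k + 1 := (Nat.log2_lt hn0).mpr (by omega)
    have : k = Nat.log2 n := by omega
    rw [this]
termination_by n - 2 ^ k
decreasing_by
  have : 2 ^ (k + 1) = 2 * 2 ^ k := by ring
  omega

theorem mmLoopR_closed (n k acc : Nat) (h : 3 * 2 ^ k - 2 < n) :
    mmLoopR n (3 * 2 ^ k - 2) acc = 3 * 2 ^ Nat.log2 ((n + 1) / 3) - 2 := by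
  have hpk : 1 ≤ 2 ^ k := Nat.one_le_two_pow
  unfold mmLoopR
  rw [if_pos h]
  have hpk1 : 2 ^ (k + 1) = 2 * 2 ^ k := by ring
  have hstep : 2 * (3 * 2 ^ k - 2) + 2 = 3 * 2 ^ (k + 1) - 2 := by omega
  rw [hstep]
  by_cases h2 : 3 * 2 ^ (k + 1) - 2 < n
  · exact mmLoopR_closed n (k + 1) _ h2
  · unfold mmLoopR
    rw [if_neg h2]
    have hq0 : (n + 1) / 3 ≠ 0 := by
      have : 3 * 2 ^ k ≤ n + 1 := by omega
      have := Nat.le_div_iff_mul_le (k := 3) (by omega) |>.mpr (by omega : 2 ^ k * 3 ≤ n + 1)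
      omega
    have hle : k ≤ Nat.log2 ((n + 1) / 3) := by
      refine (Nat.le_log2 hq0).mpr ?_
      exact Nat.le_div_iff_mul_le (by omega) |>.mpr (by omega)
    have hlt : Nat.log2 ((n + 1) / 3) < k + 1 := by
      refine (Nat.log2_lt hq0).mpr ?_
      refine Nat.div_lt_iff_lt_mul (by omega) |>.mpr ?_
      omega
    have : k = Nat.log2 ((n + 1) / 3) := by omega
    rw [this]
termination_by n - 2 ^ k
decreasing_by
  have : 2 ^ (k + 1) = 2 * 2 ^ k := by ring
  omega

-- ===== VERDICT (by name: the statement is the Claim_ definition above) =====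
theorem max_min_multiplication_spec : Claim_equal_max_min_multiplication := by
  intro data _
  unfold Spec_max_min_multiplication max_min_multiplication max_min_multiplication_alt
  by_cases h3 : data.length < 3
  · rw [if_pos h3, if_pos h3]
  · rw [if_neg h3, if_neg h3]
    have hn : 3 ≤ data.length := by omega
    have hL : mmLoopL data.length 1 1 = 2 ^ Nat.log2 data.length - 1 := by
      have := mmLoopL_closed data.length 1 1 (by simpa using (by omega : 2 ^ 1 - 1 < data.length))
      simpa using this
    have hR : mmLoopR data.length 1 2 =
        3 * 2 ^ Nat.log2 ((data.length + 1) / 3) - 2 := by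
      have := mmLoopR_closed data.length 0 2 (by simpa using (by omega : 3 * 2 ^ 0 - 2 < data.length))
      simpa using this
    have hb1 : mmBitLen data.length = Nat.log2 data.length + 1 :=
      mmBitLen_eq_log2 _ (by omega)
    have hb2 : mmBitLen ((data.length + 1) / 3) = Nat.log2 ((data.length + 1) / 3) + 1 :=
      mmBitLen_eq_log2 _ (by omega)
    simp only [hL, hR, hb1, hb2, Nat.add_sub_cancel]
    have p1 : 1 ≤ 2 ^ Nat.log2 data.length := Nat.one_le_two_pow
    have p2 : 1 ≤ 2 ^ Nat.log2 ((data.length + 1) / 3) := Nat.one_le_two_pow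
    have c1 : ((2 ^ Nat.log2 data.length - 1 : Nat) : Int) =
        Int.subNatNat (2 ^ Nat.log2 data.length) 1 := by
      rw [Int.subNatNat_eq_coe, Nat.cast_sub p1]
    have c2 : ((3 * 2 ^ Nat.log2 ((data.length + 1) / 3) - 2 : Nat) : Int) =
        Int.subNatNat (3 * 2 ^ Nat.log2 ((data.length + 1) / 3)) 2 := by
      rw [Int.subNatNat_eq_coe, Nat.cast_sub (by omega : 2 ≤ 3 * 2 ^ Nat.log2 ((data.length + 1) / 3))]
    rw [c1, c2]
    have d1 : Int.subNatNat (2 ^ Nat.log2 data.length) 1 =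
        ((2 ^ Nat.log2 data.length : Nat) : Int) - 1 := by omega
    have d2 : Int.subNatNat (3 * 2 ^ Nat.log2 ((data.length + 1) / 3)) 2 =
        ((3 * 2 ^ Nat.log2 ((data.length + 1) / 3) : Nat) : Int) - 2 := by omega
    rw [d1, d2]
    push_cast
    ring_nf
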